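-- pv_equiv track=rewrite | github.com/jaklinger/nesta_dataflow | collect_data/collect_data.py | gather_arguments
-- ===== SOURCE A (Python) =====
-- def gather_arguments(unknown):
--     key = None
--     new_args = []
--     bonus_arguments = {}
--     for arg in unknown:
--         if arg.startswith("--"):
--             if key is not None:
--                 bonus_arguments[key] = " ".join(new_args)
--             key = arg.lstrip("--")
--             new_args = []
--             continue
--         if key is None:
--             continue
--         new_args.append(arg)
--
--     if key is not None:
--         bonus_arguments[key] = " ".join(new_args)
--     return bonus_arguments
-- ===== SOURCE B (Python) =====
-- def gather_arguments(unknown):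
--     # Backward pass: walk the tokens right-to-left collecting each flag's value run,
--     # emit (key, joined-value) groups back-to-front, then build the dict in one call.
--     rev_groups = []
--     vals = []
--     for tok in reversed(unknown):
--         if tok.startswith("--"):
--             rev_groups.append((tok.lstrip("--"), " ".join(reversed(vals))))
--             vals = []
--         else:
--             vals.append(tok)
--     # tokens before the first flag are left in vals and dropped
--     return dict(reversed(rev_groups))
-- ===== Notes on version B (the rewrite author's own statement) =====
-- stated objective: alternative
-- what changed: Replaces A's forward streaming accumulate-and-flush loop (carried key/new_args state, flushed into the dict at each flag and at the end) by a backward pass that builds the (key, joined-value) group list back-to-front and then constructs the dict in a single dict() call.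
import Mathlib
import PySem

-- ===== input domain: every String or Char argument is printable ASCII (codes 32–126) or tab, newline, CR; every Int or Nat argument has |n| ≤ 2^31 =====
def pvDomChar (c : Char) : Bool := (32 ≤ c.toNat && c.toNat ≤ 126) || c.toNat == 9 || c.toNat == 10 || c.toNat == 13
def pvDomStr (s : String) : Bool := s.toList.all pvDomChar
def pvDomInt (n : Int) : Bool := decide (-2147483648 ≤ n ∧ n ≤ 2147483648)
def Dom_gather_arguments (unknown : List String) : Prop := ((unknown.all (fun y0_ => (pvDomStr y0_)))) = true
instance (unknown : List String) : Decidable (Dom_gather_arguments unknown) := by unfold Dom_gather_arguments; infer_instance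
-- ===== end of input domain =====

-- B replaces A's forward streaming accumulate-and-flush loop by a backward pass that
-- builds the (key, joined-value) group list back-to-front and then one dict() call
-- (objective: alternative decomposition, same cost).

-- s.lstrip("--"): strips ALL leading '-' characters (hand port, exact: lstrip takes a char SET)
def pvLstripHyphens (s : String) : String := String.ofList (s.toList.dropWhile (fun c => c = '-'))

-- ===== PORT A =====
-- the for-loop of A, state = (key, new_args, bonus_arguments); final flush at []
def gatherAuxA : List String → Option String → List String → PySem.Dict String String → PySem.Dict String String
  | [], key, new_args, bonus =>
      match key with
      | some k => bonus.insert k (PySem.Str.join " " new_args)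
      | none => bonus
  | arg :: rest, key, new_args, bonus =>
      if PySem.Str.startswith arg "--" then
        let bonus' := match key with
          | some k => bonus.insert k (PySem.Str.join " " new_args)
          | none => bonus
        gatherAuxA rest (some (pvLstripHyphens arg)) [] bonus'
      else
        match key with
        | none => gatherAuxA rest key new_args bonus
        | some _ => gatherAuxA rest key (new_args ++ [arg]) bonus

def gather_arguments (unknown : List String) : List (String × String) :=
  (gatherAuxA unknown none [] PySem.Dict.empty).items

-- ===== PORT B =====
-- Source B's loop body over reversed(unknown), state = (rev_groups, vals)
def pvStepB (st : List (String × String) × List String) (tok : String) :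
    List (String × String) × List String :=
  if PySem.Str.startswith tok "--" then
    (st.1 ++ [(pvLstripHyphens tok, PySem.Str.join " " st.2.reverse)], [])
  else
    (st.1, st.2 ++ [tok])

def gather_arguments_alt (unknown : List String) : List (String × String) :=
  let st := unknown.reverse.foldl pvStepB ([], [])
  (PySem.Dict.ofList st.1.reverse).items

-- ===== PRECONDITION & SPEC =====
def Spec_gather_arguments (unknown : List String) (out : List (String × String)) : Prop := out = gather_arguments_alt unknown
instance (unknown : List String) (out : List (String × String)) : Decidable (Spec_gather_arguments unknown out) := by unfold Spec_gather_arguments; infer_instance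

-- ===== CLAIM (what is proved, stated in full; the proofs are below) =====
def Claim_equal_gather_arguments : Prop := ∀ (unknown : List String), Dom_gather_arguments unknown → Spec_gather_arguments unknown (gather_arguments unknown)

-- ===== LEMMAS AND PROOFS =====

-- proof-only middle form: the token list split into (key, joined value) groups, in order
def pvSplitGroups : List String → List (String × String)
  | [] => []
  | head :: toks =>
    if PySem.Str.startswith head "--" then
      (pvLstripHyphens head,
        PySem.Str.join " " (toks.takeWhile (fun t => !PySem.Str.startswith t "--")))
        :: pvSplitGroups (toks.dropWhile (fun t => !PySem.Str.startswith t "--"))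
    else pvSplitGroups toks
termination_by l => l.length
decreasing_by
  · exact Nat.lt_succ_of_le (List.length_dropWhile_le _ _)
  · exact Nat.lt_succ_of_le (Nat.le_refl _)

def pvFoldD (d : PySem.Dict String String) (l : List (String × String)) : PySem.Dict String String :=
  l.foldl (fun d p => d.insert p.1 p.2) d

theorem pvFoldD_cons (d : PySem.Dict String String) (p : String × String) (l : List (String × String)) :
    pvFoldD d (p :: l) = pvFoldD (d.insert p.1 p.2) l := rfl

-- A's loop with a pending key k and accumulated args acc equals: flush k with acc plus the
-- coming run of non-flag tokens, then fold the remaining groups.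
theorem gatherAuxA_some (xs : List String) : ∀ (k : String) (acc : List String) (d : PySem.Dict String String),
    gatherAuxA xs (some k) acc d =
      pvFoldD (d.insert k (PySem.Str.join " " (acc ++ xs.takeWhile (fun t => !PySem.Str.startswith t "--"))))
        (pvSplitGroups (xs.dropWhile (fun t => !PySem.Str.startswith t "--"))) := by
  induction xs with
  | nil => intro k acc d; simp [gatherAuxA, pvSplitGroups, pvFoldD]
  | cons x xs ih =>
    intro k acc d
    by_cases hx : PySem.Str.startswith x "--"
    · have hx' : PySem.Chars.startswith x.toList ['-', '-'] = true := by simpa using hx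
      rw [pvSplitGroups.eq_def]
      simp only [gatherAuxA, List.takeWhile_cons, List.dropWhile_cons, ih]
      simp [hx', pvFoldD_cons]
    · have hx' : PySem.Chars.startswith x.toList ['-', '-'] = false := by simpa using hx
      simp only [gatherAuxA, List.takeWhile_cons, List.dropWhile_cons, ih]
      simp [hx', List.append_assoc]

-- A's loop before the first flag just scans: it equals folding all groups of the rest.
theorem gatherAuxA_none (xs : List String) : ∀ (acc : List String) (d : PySem.Dict String String),
    gatherAuxA xs none acc d = pvFoldD d (pvSplitGroups xs) := by
  induction xs with
  | nil => intro acc d; simp [gatherAuxA, pvSplitGroups, pvFoldD]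
  | cons x xs ih =>
    intro acc d
    by_cases hx : PySem.Str.startswith x "--"
    · have hx' : PySem.Chars.startswith x.toList ['-', '-'] = true := by simpa using hx
      rw [pvSplitGroups.eq_def]
      simp only [gatherAuxA, gatherAuxA_some]
      simp [hx', pvFoldD_cons]
    · have hx' : PySem.Chars.startswith x.toList ['-', '-'] = false := by simpa using hx
      rw [pvSplitGroups.eq_def]
      simp only [gatherAuxA, ih]
      simp [hx']

-- pvSplitGroups skips a non-flag prefix
theorem pvSplitGroups_dropWhile (xs : List String) :
    pvSplitGroups (xs.dropWhile (fun t => !PySem.Chars.startswith t.toList ['-', '-'])) = pvSplitGroups xs := by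
  induction xs with
  | nil => rfl
  | cons x xs ih =>
    by_cases hx : PySem.Chars.startswith x.toList ['-', '-']
    · rw [List.dropWhile_cons]
      simp [hx]
    · rw [List.dropWhile_cons]
      simp only [hx, Bool.not_false, if_pos]
      rw [ih]
      conv_rhs => rw [pvSplitGroups.eq_def]
      simp [hx]

-- the backward loop of B computes the groups reversed and the pending non-flag prefix reversed
theorem foldrB (xs : List String) :
    xs.foldr (fun tok st => pvStepB st tok) ([], []) =
      ((pvSplitGroups xs).reverse, (xs.takeWhile (fun t => !PySem.Chars.startswith t.toList ['-', '-'])).reverse) := by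
  induction xs with
  | nil => simp [pvSplitGroups]
  | cons x xs ih =>
    rw [List.foldr_cons, ih]
    by_cases hx : PySem.Chars.startswith x.toList ['-', '-']
    · conv_rhs => rw [pvSplitGroups.eq_def]
      simp [pvStepB, hx, pvSplitGroups_dropWhile]
    · rw [List.takeWhile_cons]
      conv_rhs => rw [pvSplitGroups.eq_def]
      simp [pvStepB, hx]

theorem ofList_eq_pvFoldD (l : List (String × String)) :
    PySem.Dict.ofList l = pvFoldD PySem.Dict.empty l := rfl

-- ===== VERDICT (by name: the statement is the Claim_ definition above) =====
theorem gather_arguments_spec : Claim_equal_gather_arguments := by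
  intro unknown _
  unfold Spec_gather_arguments gather_arguments gather_arguments_alt
  rw [gatherAuxA_none, List.foldl_reverse, foldrB]
  simp [ofList_eq_pvFoldD]
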